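-- pv_equiv track=rewrite | github.com/smearle/script-doctor | puzzlejax/env.py | expand_joint_objs
-- ===== SOURCE A (Python) =====
-- def expand_joint_objs(objs, joint_tiles):
--     """Expand a list of objects to include all the objects in the joint tiles."""
--     expanded_objs = []
--     for obj in objs:
--         if obj in joint_tiles:
--             expanded_objs.extend(expand_joint_objs(joint_tiles[obj], joint_tiles))
--         else:
--             expanded_objs.append(obj)
--     return expanded_objs
-- ===== SOURCE B (Python) =====
-- def expand_joint_objs(objs, joint_tiles):
--     """Expand a list of objects to include all the objects in the joint tiles.
--
--     Level-by-level substitution: repeatedly rewrite the whole list in one pass,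
--     replacing every joint tile by its members, until no joint tile remains."""
--     cur = list(objs)
--     while any(o in joint_tiles for o in cur):
--         cur = [x for o in cur
--                  for x in (joint_tiles[o] if o in joint_tiles else (o,))]
--     return cur
-- ===== Notes on version B (the rewrite author's own statement) =====
-- stated objective: alternative
-- what changed: Replaced A's depth-first recursion by whole-list substitution passes: one pass rewrites every joint tile into its members, repeated until no joint tile remains (a fixed-point of a single flat rewriting step instead of recursive descent).
import Mathlib
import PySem

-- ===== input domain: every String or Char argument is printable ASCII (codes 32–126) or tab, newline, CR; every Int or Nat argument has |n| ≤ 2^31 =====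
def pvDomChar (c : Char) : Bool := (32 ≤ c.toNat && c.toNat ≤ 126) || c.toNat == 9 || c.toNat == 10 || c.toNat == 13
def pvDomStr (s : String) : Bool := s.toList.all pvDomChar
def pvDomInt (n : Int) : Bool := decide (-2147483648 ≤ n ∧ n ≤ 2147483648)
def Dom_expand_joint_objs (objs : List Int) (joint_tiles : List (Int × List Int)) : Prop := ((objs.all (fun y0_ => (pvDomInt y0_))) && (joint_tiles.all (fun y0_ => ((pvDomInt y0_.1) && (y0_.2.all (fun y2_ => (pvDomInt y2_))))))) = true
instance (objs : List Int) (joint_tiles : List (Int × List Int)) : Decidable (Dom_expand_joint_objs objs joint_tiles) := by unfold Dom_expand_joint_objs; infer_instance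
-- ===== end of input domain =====

-- B replaces A's depth-first recursion by repeated whole-list substitution passes
-- (rewrite every joint tile into its members, until none remains); same values, no recursion.

-- first-match lookup in the association list (= Python dict lookup / `in` test)
def jtGet? (jt : List (Int × List Int)) (k : Int) : Option (List Int) :=
  (jt.find? (fun p => p.1 == k)).map (·.2)

-- total length of the value lists of joint_tiles
def jtSize (jt : List (Int × List Int)) : Nat := (jt.map (fun p => p.2.length)).sum

-- Fuel used as a pure totality guard by BOTH ports (A counts one unit per object
-- processed, B one unit per substitution pass); on every input admitted by
-- Pre_expand_joint_objs it is proved generous enough that neither port ever hits it.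
def pvFuel (objs : List Int) (jt : List (Int × List Int)) : Nat :=
  (objs.length + 1) * (jtSize jt + 2) ^ (jt.length + 1)

-- ===== PORT A =====
-- A's recursion, step for step; fuel decreases by 1 for each object taken from a list and is
-- threaded through (returned) so that sibling calls share the budget.  `min r1.2 f` is a pure
-- totality guard for the termination checker; it never changes the value (goA returns at most
-- the fuel it received, see lemma fuel_LA below which computes the leftover exactly).
def goA (jt : List (Int × List Int)) : Nat → List Int → List Int × Nat
  | f, [] => ([], f)
  | 0, _ :: _ => ([], 0)
  | f + 1, obj :: rest =>
    match jtGet? jt obj with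
    | some vs =>
      let r1 := goA jt f vs
      let r2 := goA jt (min r1.2 f) rest
      (r1.1 ++ r2.1, r2.2)
    | none =>
      let r2 := goA jt f rest
      (obj :: r2.1, r2.2)
termination_by f _ => f
decreasing_by all_goals omega

def expand_joint_objs (objs : List Int) (joint_tiles : List (Int × List Int)) : List Int :=
  (goA joint_tiles (pvFuel objs joint_tiles) objs).1

-- ===== PORT B =====
-- one element of a substitution pass: a joint tile becomes its members, anything else stays
def exp1 (jt : List (Int × List Int)) (o : Int) : List Int :=
  match jtGet? jt o with
  | some vs => vs
  | none => [o]

-- one whole-list substitution pass (the list comprehension in Source B)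
def stepB (jt : List (Int × List Int)) (xs : List Int) : List Int :=
  xs.flatMap (exp1 jt)

-- the while loop of Source B, with fuel as totality guard (one unit per pass)
def loopB (jt : List (Int × List Int)) : Nat → List Int → List Int
  | 0, xs => xs
  | f + 1, xs =>
    if xs.any (fun o => (jtGet? jt o).isSome) then loopB jt f (stepB jt xs) else xs

def expand_joint_objs_alt (objs : List Int) (joint_tiles : List (Int × List Int)) : List Int :=
  loopB joint_tiles (pvFuel objs joint_tiles) objs

-- ===== PRECONDITION & SPEC =====
-- htOk n o: the alias tree rooted at o has height ≤ n, i.e. every alias chain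
-- o → joint_tiles[o] → … reaches a plain (non-joint) object within n steps.  This is a
-- static graph condition on the input map (bounded height of the finite alias graph,
-- equivalent to acyclicity of its part reachable from o, since chains of distinct keys
-- have length ≤ joint_tiles.length); it inspects only joint_tiles, not either algorithm.
def htOk (jt : List (Int × List Int)) : Nat → Int → Bool
  | 0, o => (jtGet? jt o).isNone
  | n + 1, o =>
    match jtGet? jt o with
    | none => true
    | some vs => vs.all (fun x => htOk jt n x)

-- Pre_ excludes exactly the inputs on which the Python A does not return: those where some
-- alias chain from objs through joint_tiles never bottoms out (a cycle of the finite alias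
-- map), making A's recursion infinite (RecursionError); B's while loop diverges there too.
def Pre_expand_joint_objs (objs : List Int) (joint_tiles : List (Int × List Int)) : Prop :=
  ∀ o ∈ objs, htOk joint_tiles joint_tiles.length o = true
instance (objs : List Int) (joint_tiles : List (Int × List Int)) : Decidable (Pre_expand_joint_objs objs joint_tiles) := by unfold Pre_expand_joint_objs; infer_instance

def pvWitness_expand_joint_objs : List Int × (List (Int × List Int)) :=
  ([1, 5], [(1, [2, 3]), (3, [4])])

def Spec_expand_joint_objs (objs : List Int) (joint_tiles : List (Int × List Int)) (out : List Int) : Prop := out = expand_joint_objs_alt objs joint_tiles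
instance (objs : List Int) (joint_tiles : List (Int × List Int)) (out : List Int) : Decidable (Spec_expand_joint_objs objs joint_tiles out) := by unfold Spec_expand_joint_objs; infer_instance

-- ===== CLAIM (what is proved, stated in full; the proofs are below) =====
def Claim_equal_expand_joint_objs : Prop := ∀ (objs : List Int) (joint_tiles : List (Int × List Int)), Dom_expand_joint_objs objs joint_tiles → Pre_expand_joint_objs objs joint_tiles → Spec_expand_joint_objs objs joint_tiles (expand_joint_objs objs joint_tiles)

-- ===== LEMMAS AND PROOFS =====

-- depth-n expansion of one object (the common mathematical description of both ports)
def Eb (jt : List (Int × List Int)) : Nat → Int → List Int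
  | 0, o => [o]
  | n + 1, o =>
    match jtGet? jt o with
    | none => [o]
    | some vs => vs.flatMap (Eb jt n)

-- fuel consumed by A on one object when it is expanded to depth n
def costE (jt : List (Int × List Int)) : Nat → Int → Nat
  | 0, _ => 1
  | n + 1, o =>
    match jtGet? jt o with
    | none => 1
    | some vs => 1 + (vs.map (costE jt n)).sum

def costS (jt : List (Int × List Int)) (n : Nat) (xs : List Int) : Nat :=
  (xs.map (costE jt n)).sum

def stepN (jt : List (Int × List Int)) : Nat → List Int → List Int
  | 0, xs => xs
  | n + 1, xs => stepN jt n (stepB jt xs)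

theorem Eb_leaf (jt : List (Int × List Int)) (n : Nat) (o : Int)
    (h : jtGet? jt o = none) : Eb jt n o = [o] := by
  cases n <;> simp [Eb, h]

theorem Eb_succ (jt : List (Int × List Int)) (n : Nat) (o : Int) :
    Eb jt (n + 1) o = (exp1 jt o).flatMap (Eb jt n) := by
  cases h : jtGet? jt o <;> simp [Eb, exp1, h, Eb_leaf jt n o]

theorem costE_pos (jt : List (Int × List Int)) (n : Nat) (o : Int) : 1 ≤ costE jt n o := by
  cases n <;> cases h : jtGet? jt o <;> simp [costE, h]

theorem stepN_eq_flatMap (jt : List (Int × List Int)) (n : Nat) :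
    ∀ xs : List Int, stepN jt n xs = xs.flatMap (Eb jt n) := by
  induction n with
  | zero => intro xs; simp [stepN, Eb]
  | succ n ih =>
    intro xs
    simp only [stepN]
    rw [ih (stepB jt xs)]
    simp only [stepB, List.flatMap_assoc]
    exact List.flatMap_congr (fun o _ => (Eb_succ jt n o).symm)

theorem stepB_fix (jt : List (Int × List Int)) (xs : List Int)
    (h : ¬ xs.any (fun o => (jtGet? jt o).isSome)) : stepB jt xs = xs := by
  simp only [List.any_eq_true, not_exists, not_and, Bool.not_eq_true] at h
  have : ∀ o ∈ xs, exp1 jt o = [o] := by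
    intro o ho
    have := h o ho
    cases hg : jtGet? jt o with
    | none => simp [exp1, hg]
    | some vs => rw [hg] at this; simp at this
  calc stepB jt xs = xs.flatMap (fun o => [o]) := List.flatMap_congr this
    _ = xs := by simp

theorem stepN_fix (jt : List (Int × List Int)) (n : Nat) (xs : List Int)
    (h : ¬ xs.any (fun o => (jtGet? jt o).isSome)) : stepN jt n xs = xs := by
  induction n with
  | zero => rfl
  | succ n ih => simp only [stepN, stepB_fix jt xs h, ih]

-- B's while loop reaches the fixed point as soon as every element is plain
theorem loopB_eq_stepN (jt : List (Int × List Int)) :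
    ∀ (f : Nat) (xs : List Int),
      ¬ (stepN jt f xs).any (fun o => (jtGet? jt o).isSome) →
      loopB jt f xs = stepN jt f xs := by
  intro f
  induction f with
  | zero => intro xs _; rfl
  | succ f ih =>
    intro xs hall
    by_cases h : xs.any (fun o => (jtGet? jt o).isSome)
    · simp only [loopB]
      rw [if_pos h]
      exact ih (stepB jt xs) hall
    · simp only [loopB]
      rw [if_neg h]
      simp only [stepN, stepB_fix jt xs h, stepN_fix jt f xs h]

-- main lemma about A: with sufficient fuel, goA computes the depth-n expansion and
-- returns exactly the unspent fuel
theorem fuel_LA (jt : List (Int × List Int)) :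
    ∀ n : Nat, ∀ objs : List Int, ∀ f : Nat,
      (∀ o ∈ objs, htOk jt n o = true) → costS jt n objs ≤ f →
      goA jt f objs = (objs.flatMap (Eb jt n), f - costS jt n objs) := by
  intro n
  induction n with
  | zero =>
    intro objs
    induction objs with
    | nil => intro f _ _; simp [goA, costS]
    | cons o rest ih =>
      intro f hht hc
      have hleaf : jtGet? jt o = none := by
        have := hht o (by simp)
        simpa [htOk, Option.isNone_iff_eq_none] using this
      have hcost : costS jt 0 (o :: rest) = 1 + costS jt 0 rest := by
        simp [costS, costE]
      rw [hcost] at hc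
      obtain ⟨f', rfl⟩ : ∃ f', f = f' + 1 := ⟨f - 1, by omega⟩
      have hrest := ih f' (fun x hx => hht x (by simp [hx])) (by omega)
      simp only [goA, hleaf, hrest]
      rw [Prod.mk.injEq]
      refine ⟨?_, by omega⟩
      simp [Eb_leaf jt 0 o hleaf]
  | succ n ihn =>
    intro objs
    induction objs with
    | nil => intro f _ _; simp [goA, costS]
    | cons o rest ih =>
      intro f hht hc
      have hcost : costS jt (n + 1) (o :: rest) = costE jt (n + 1) o + costS jt (n + 1) rest := by
        simp [costS]
      have hpos := costE_pos jt (n + 1) o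
      obtain ⟨f', rfl⟩ : ∃ f', f = f' + 1 := ⟨f - 1, by omega⟩
      cases hg : jtGet? jt o with
      | none =>
        have hco : costE jt (n + 1) o = 1 := by simp [costE, hg]
        have hrest := ih f' (fun x hx => hht x (by simp [hx])) (by omega)
        simp only [goA, hg, hrest]
        rw [Prod.mk.injEq]
        refine ⟨?_, by omega⟩
        simp [Eb_leaf jt (n + 1) o hg]
      | some vs =>
        have hvs : ∀ v ∈ vs, htOk jt n v = true := by
          have := hht o (by simp)
          simp only [htOk, hg, List.all_eq_true] at this
          exact this
        have hco : costE jt (n + 1) o = 1 + costS jt n vs := by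
          simp [costE, hg, costS]
        have h1 := ihn vs f' hvs (by omega)
        have hle : f' - costS jt n vs ≤ f' := by omega
        have h2 := ih (f' - costS jt n vs) (fun x hx => hht x (by simp [hx])) (by omega)
        simp only [goA, hg, h1, min_eq_left hle, h2]
        rw [Prod.mk.injEq]
        refine ⟨?_, by omega⟩
        simp [Eb, hg]

theorem jtGet?_len (jt : List (Int × List Int)) (o : Int) (vs : List Int)
    (h : jtGet? jt o = some vs) : vs.length ≤ jtSize jt := by
  simp only [jtGet?, Option.map_eq_some_iff] at h
  obtain ⟨p, hp, hv⟩ := h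
  subst hv
  have hmem := List.mem_of_find?_eq_some hp
  have hmem2 : p.2.length ∈ jt.map (fun p => p.2.length) := List.mem_map_of_mem hmem
  have := List.single_le_sum (l := jt.map (fun p => p.2.length)) (fun x _ => Nat.zero_le x) _ hmem2
  simpa [jtSize] using this

theorem costE_bound (jt : List (Int × List Int)) :
    ∀ n : Nat, ∀ o : Int, costE jt n o ≤ (jtSize jt + 2) ^ (n + 1) := by
  intro n
  induction n with
  | zero =>
    intro o
    have : costE jt 0 o = 1 := rfl
    rw [this]
    exact Nat.one_le_pow _ _ (by omega)
  | succ n ih =>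
    intro o
    cases hg : jtGet? jt o with
    | none =>
      simp only [costE, hg]
      exact Nat.one_le_pow _ _ (by omega)
    | some vs =>
      have hsum : (vs.map (costE jt n)).sum ≤ vs.length * (jtSize jt + 2) ^ (n + 1) := by
        have h := List.sum_le_card_nsmul (vs.map (costE jt n)) ((jtSize jt + 2) ^ (n + 1))
          (by intro x hx
              simp only [List.mem_map] at hx
              obtain ⟨v, _, rfl⟩ := hx
              exact ih v)
        simpa [smul_eq_mul] using h
      have hlen := jtGet?_len jt o vs hg
      have hX : 1 ≤ (jtSize jt + 2) ^ (n + 1) := Nat.one_le_pow _ _ (by omega)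
      simp only [costE, hg]
      calc 1 + (vs.map (costE jt n)).sum
          ≤ 1 + jtSize jt * (jtSize jt + 2) ^ (n + 1) := by
            have : vs.length * (jtSize jt + 2) ^ (n + 1) ≤ jtSize jt * (jtSize jt + 2) ^ (n + 1) :=
              Nat.mul_le_mul_right _ hlen
            omega
        _ ≤ (jtSize jt + 2) * (jtSize jt + 2) ^ (n + 1) := by nlinarith
        _ = (jtSize jt + 2) ^ (n + 1 + 1) := by ring

theorem costS_le_fuel (objs : List Int) (jt : List (Int × List Int)) :
    costS jt jt.length objs ≤ pvFuel objs jt := by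
  unfold pvFuel costS
  have h := List.sum_le_card_nsmul (objs.map (costE jt jt.length)) ((jtSize jt + 2) ^ (jt.length + 1))
    (by intro x hx
        simp only [List.mem_map] at hx
        obtain ⟨v, _, rfl⟩ := hx
        exact costE_bound jt jt.length v)
  simp only [List.length_map, smul_eq_mul] at h
  calc (objs.map (costE jt jt.length)).sum
      ≤ objs.length * (jtSize jt + 2) ^ (jt.length + 1) := h
    _ ≤ (objs.length + 1) * (jtSize jt + 2) ^ (jt.length + 1) :=
        Nat.mul_le_mul_right _ (by omega)

-- depth-bounded objects have stable expansions
theorem Eb_stab (jt : List (Int × List Int)) :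
    ∀ n : Nat, ∀ o : Int, htOk jt n o = true → ∀ k : Nat, Eb jt (n + k) o = Eb jt n o := by
  intro n
  induction n with
  | zero =>
    intro o h k
    have : jtGet? jt o = none := by simpa [htOk, Option.isNone_iff_eq_none] using h
    rw [Eb_leaf jt _ o this, Eb_leaf jt 0 o this]
  | succ n ih =>
    intro o h k
    cases hg : jtGet? jt o with
    | none => rw [Eb_leaf jt _ o hg, Eb_leaf jt (n+1) o hg]
    | some vs =>
      have hvs : ∀ v ∈ vs, htOk jt n v = true := by
        simp only [htOk, hg, List.all_eq_true] at h; exact h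
      have : n + 1 + k = (n + k) + 1 := by omega
      rw [this]
      simp only [Eb, hg]
      exact List.flatMap_congr (fun v hv => ih v (hvs v hv) k)

-- depth-bounded objects expand to plain objects only
theorem Eb_all_leaf (jt : List (Int × List Int)) :
    ∀ n : Nat, ∀ o : Int, htOk jt n o = true →
      ∀ x ∈ Eb jt n o, jtGet? jt x = none := by
  intro n
  induction n with
  | zero =>
    intro o h x hx
    have hn : jtGet? jt o = none := by simpa [htOk, Option.isNone_iff_eq_none] using h
    simp only [Eb, List.mem_singleton] at hx
    rw [hx]; exact hn
  | succ n ih =>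
    intro o h x hx
    cases hg : jtGet? jt o with
    | none =>
      rw [Eb_leaf jt (n+1) o hg] at hx
      simp only [List.mem_singleton] at hx
      rw [hx]; exact hg
    | some vs =>
      have hvs : ∀ v ∈ vs, htOk jt n v = true := by
        simp only [htOk, hg, List.all_eq_true] at h; exact h
      simp only [Eb, hg, List.mem_flatMap] at hx
      obtain ⟨v, hv, hxv⟩ := hx
      exact ih v (hvs v hv) x hxv

theorem fuel_ge_depth (objs : List Int) (jt : List (Int × List Int)) :
    jt.length ≤ pvFuel objs jt := by
  unfold pvFuel
  have h0 : jt.length < 2 ^ jt.length := Nat.lt_two_pow_self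
  have h1 : (2:Nat) ^ jt.length ≤ 2 ^ (jt.length + 1) := Nat.pow_le_pow_right (by omega) (by omega)
  have h2 : (2:Nat) ^ (jt.length + 1) ≤ (jtSize jt + 2) ^ (jt.length + 1) :=
    Nat.pow_le_pow_left (by omega) _
  have h3 : (jtSize jt + 2) ^ (jt.length + 1) ≤ (objs.length + 1) * (jtSize jt + 2) ^ (jt.length + 1) :=
    Nat.le_mul_of_pos_left _ (by omega)
  omega

-- ===== VERDICT (by name: the statement is the Claim_ definition above) =====
theorem expand_joint_objs_spec : Claim_equal_expand_joint_objs := by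
  intro objs jt _ hpre
  unfold Spec_expand_joint_objs expand_joint_objs expand_joint_objs_alt
  set N := jt.length with hN
  set F := pvFuel objs jt with hF
  -- A's side
  have hA := fuel_LA jt N objs F hpre (costS_le_fuel objs jt)
  -- the depth-F expansion equals the depth-N expansion, and consists of plain objects
  have hstab : ∀ o ∈ objs, Eb jt F o = Eb jt N o := by
    intro o ho
    have : F = N + (F - N) := by
      have := fuel_ge_depth objs jt; omega
    rw [this]
    exact Eb_stab jt N o (hpre o ho) (F - N)
  have hflat : objs.flatMap (Eb jt F) = objs.flatMap (Eb jt N) := List.flatMap_congr hstab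
  have hleaf : ¬ (stepN jt F objs).any (fun o => (jtGet? jt o).isSome) := by
    rw [stepN_eq_flatMap jt F objs, hflat]
    simp only [List.any_eq_true, not_exists, not_and]
    intro x hx
    simp only [List.mem_flatMap] at hx
    obtain ⟨o, ho, hxo⟩ := hx
    have := Eb_all_leaf jt N o (hpre o ho) x hxo
    simp [this]
  -- B's side
  have hB := loopB_eq_stepN jt F objs hleaf
  rw [hA, hB, stepN_eq_flatMap jt F objs, hflat]
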